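-- pv_equiv track=rewrite | github.com/samihsq/slm-agentic-benchmarking | src/benchmarks/skills/instruction_following/word_instruction_following.py | L21_length_compare
-- ===== SOURCE A (Python) =====
-- def L21_length_compare(L):
--     out=[]
--     for i,x in enumerate(L):
--         if i==0:
--             out.append("SHORT")
--         else:
--             if len(x) > len(L[i-1]):
--                 out.append("LONGER")
--             elif len(x) < len(L[i-1]):
--                 out.append("SHORTER")
--             else:
--                 out.append("EQUAL")
--     return out
-- ===== SOURCE B (Python) =====
-- _TAG = {1: "LONGER", -1: "SHORTER", 0: "EQUAL"}
--
--
-- def _seg(prev, xs):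
--     # tags for xs, where prev is the length of the element just before xs;
--     # divide and conquer: split xs in half, the right half's predecessor is
--     # the last element of the left half.
--     n = len(xs)
--     if n == 0:
--         return []
--     if n == 1:
--         cur = len(xs[0])
--         return [_TAG[(cur > prev) - (cur < prev)]]
--     m = n // 2
--     return _seg(prev, xs[:m]) + _seg(len(xs[m - 1]), xs[m:])
--
--
-- def L21_length_compare(L):
--     if not L:
--         return []
--     return ["SHORT"] + _seg(len(L[0]), L[1:])
-- ===== Notes on version B (the rewrite author's own statement) =====
-- stated objective: alternative
-- what changed: Replaces A's single index-based loop with a divide-and-conquer recursion: the tail is split into halves, each half is tagged recursively given the length of the element just before it, and the tag itself is picked from a sign table {1,-1,0} instead of an if/elif chain.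
import Mathlib
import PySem

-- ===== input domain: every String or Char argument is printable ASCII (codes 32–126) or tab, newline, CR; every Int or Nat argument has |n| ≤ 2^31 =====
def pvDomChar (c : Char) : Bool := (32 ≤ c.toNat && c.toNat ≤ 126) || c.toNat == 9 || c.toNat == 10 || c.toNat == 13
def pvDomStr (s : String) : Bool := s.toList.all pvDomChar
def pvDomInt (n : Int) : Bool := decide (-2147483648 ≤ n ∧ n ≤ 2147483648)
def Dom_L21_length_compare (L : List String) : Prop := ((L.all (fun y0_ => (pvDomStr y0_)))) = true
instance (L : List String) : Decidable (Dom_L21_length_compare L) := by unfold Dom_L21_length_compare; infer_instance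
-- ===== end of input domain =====

-- B replaces A's index-based loop with a divide-and-conquer recursion over halves of the
-- tail (predecessor length passed down; tag picked from a sign table) — objective: alternative.


-- ===== PORT A =====
def L21_length_compare (L : List String) : List String :=
  (PySem.List.enumerate L).foldl (fun out ix =>
    if ix.1 == 0 then out ++ ["SHORT"]
    else
      if PySem.Str.len ix.2 > PySem.Str.len (PySem.List.pyGetD L (ix.1 - 1) "") then out ++ ["LONGER"]
      else if PySem.Str.len ix.2 < PySem.Str.len (PySem.List.pyGetD L (ix.1 - 1) "") then out ++ ["SHORTER"]
      else out ++ ["EQUAL"]) []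

-- ===== PORT B =====
-- the module-level table _TAG
def pvTagTable : PySem.Dict Int String :=
  PySem.Dict.ofList [(1, "LONGER"), (-1, "SHORTER"), (0, "EQUAL")]

-- _seg(prev, xs).  n // 2 on the nonnegative n is Nat division (exact here);
-- xs[:m] / xs[m:] with 0 ≤ m ≤ len xs are take/drop (exact here).
def pvSeg (prev : Int) (xs : List String) : List String :=
  if xs.length = 0 then []
  else if xs.length = 1 then
    [PySem.Dict.getD pvTagTable
      ((if PySem.Str.len (PySem.List.pyGetD xs 0 "") > prev then 1 else 0) -
       (if PySem.Str.len (PySem.List.pyGetD xs 0 "") < prev then 1 else 0)) ""]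
  else
    pvSeg prev (xs.take (xs.length / 2)) ++
      pvSeg (PySem.Str.len (PySem.List.pyGetD xs ((xs.length / 2 : Nat) - 1 : Int) ""))
        (xs.drop (xs.length / 2))
termination_by xs.length
decreasing_by
  · simp; omega
  · simp; omega

def L21_length_compare_alt (L : List String) : List String :=
  match L with
  | [] => []
  | x :: xs => ["SHORT"] ++ pvSeg (PySem.Str.len x) xs

-- ===== PRECONDITION & SPEC =====
def Spec_L21_length_compare (L : List String) (out : List String) : Prop := out = L21_length_compare_alt L
instance (L : List String) (out : List String) : Decidable (Spec_L21_length_compare L out) := by unfold Spec_L21_length_compare; infer_instance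

-- ===== CLAIM (what is proved, stated in full; the proofs are below) =====
def Claim_equal_L21_length_compare : Prop := ∀ (L : List String), Dom_L21_length_compare L → Spec_L21_length_compare L (L21_length_compare L)

-- ===== LEMMAS AND PROOFS =====

-- the tag A emits for one enumerated element (i, x) of L
def pvTagA (L : List String) (ix : Int × String) : String :=
  if ix.1 == 0 then "SHORT"
  else
    if PySem.Str.len ix.2 > PySem.Str.len (PySem.List.pyGetD L (ix.1 - 1) "") then "LONGER"
    else if PySem.Str.len ix.2 < PySem.Str.len (PySem.List.pyGetD L (ix.1 - 1) "") then "SHORTER"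
    else "EQUAL"

theorem pvFoldA (L : List String) (es : List (Int × String)) (acc : List String) :
    es.foldl (fun out ix =>
      if ix.1 == 0 then out ++ ["SHORT"]
      else
        if PySem.Str.len ix.2 > PySem.Str.len (PySem.List.pyGetD L (ix.1 - 1) "") then out ++ ["LONGER"]
        else if PySem.Str.len ix.2 < PySem.Str.len (PySem.List.pyGetD L (ix.1 - 1) "") then out ++ ["SHORTER"]
        else out ++ ["EQUAL"]) acc = acc ++ es.map (pvTagA L) := by
  induction es generalizing acc with
  | nil => simp
  | cons e es ih =>
    simp only [List.foldl_cons, List.map_cons, ih, pvTagA]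
    split_ifs <;> simp

theorem pvA_eq_map (L : List String) :
    L21_length_compare L = (PySem.List.enumerate L).map (pvTagA L) := by
  unfold L21_length_compare
  rw [pvFoldA]
  simp

-- the tag as an if-chain
def pvTagStr (prev cur : Int) : String :=
  if cur > prev then "LONGER" else if cur < prev then "SHORTER" else "EQUAL"

theorem pvTag_table (prev cur : Int) :
    PySem.Dict.getD pvTagTable ((if cur > prev then 1 else 0) - (if cur < prev then 1 else 0)) ""
      = pvTagStr prev cur := by
  unfold pvTagStr
  split_ifs with h1 h2 <;> first | omega | decide

-- canonical predecessor-carrying recursion both sides reduce to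
def pvGo (prev : Int) : List String → List String
  | [] => []
  | x :: rest => pvTagStr prev (PySem.Str.len x) :: pvGo (PySem.Str.len x) rest

-- length of the last element of as, or prev if as is empty
def pvLastLen (prev : Int) (as : List String) : Int :=
  match as.getLast? with
  | none => prev
  | some x => PySem.Str.len x

theorem pvLastLen_cons (prev : Int) (a : String) (as : List String) :
    pvLastLen prev (a :: as) = pvLastLen (PySem.Str.len a) as := by
  cases as with
  | nil => simp [pvLastLen]
  | cons h t =>
    obtain ⟨y, hy⟩ : ∃ y, (h :: t).getLast? = some y := Option.isSome_iff_exists.mp (by simp)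
    simp [pvLastLen, hy]

theorem pvGo_append (as bs : List String) (prev : Int) :
    pvGo prev (as ++ bs) = pvGo prev as ++ pvGo (pvLastLen prev as) bs := by
  induction as generalizing prev with
  | nil => simp [pvGo, pvLastLen]
  | cons a as ih =>
    simp only [List.cons_append, pvGo, ih, pvLastLen_cons]

theorem pvSeg_eq_go : ∀ (n : Nat) (xs : List String), xs.length = n → ∀ prev,
    pvSeg prev xs = pvGo prev xs := by
  intro n
  induction n using Nat.strong_induction_on with
  | _ n ih =>
    intro xs hlen prev
    rw [pvSeg]
    by_cases h0 : xs.length = 0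
    · rw [if_pos h0]
      cases xs
      · rfl
      · simp at h0
    · rw [if_neg h0]
      by_cases h1 : xs.length = 1
      · rw [if_pos h1]
        match xs, h1 with
        | [x], _ =>
          simp only [PySem.List.pyGetD_zero_cons, pvGo]
          rw [pvTag_table]
      · rw [if_neg h1]
        have hm1 : 1 ≤ xs.length / 2 := by omega
        have hmn : xs.length / 2 < xs.length := by omega
        rw [ih (xs.take (xs.length / 2)).length (by simp; omega) _ rfl,
            ih (xs.drop (xs.length / 2)).length (by simp; omega) _ rfl]
        have hlast : PySem.Str.len
            (PySem.List.pyGetD xs ((xs.length / 2 : Nat) - 1 : Int) "")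
            = pvLastLen prev (xs.take (xs.length / 2)) := by
          have hc : ((xs.length / 2 : Nat) - 1 : Int) = ((xs.length / 2 - 1 : Nat) : Int) := by
            omega
          rw [hc, PySem.List.pyGetD_natCast]
          have hlt : xs.length / 2 - 1 < xs.length := by omega
          rw [List.getD_eq_getElem xs "" hlt]
          unfold pvLastLen
          rw [List.getLast?_eq_getElem?]
          have hlen' : (xs.take (xs.length / 2)).length = xs.length / 2 := by simp; omega
          rw [hlen', List.getElem?_take_of_lt (by omega), List.getElem?_eq_getElem hlt]
        rw [hlast, ← pvGo_append, List.take_append_drop]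

-- pvGo in the adjacent-pairs (zip) form used to characterise A
theorem pvGo_zip (ys : List String) (prev : Int) :
    pvGo prev ys = ((prev :: ys.map PySem.Str.len).zip (ys.map PySem.Str.len)).map
      (fun p : Int × Int => if p.2 > p.1 then "LONGER" else if p.2 < p.1 then "SHORTER" else "EQUAL") := by
  induction ys generalizing prev with
  | nil => simp [pvGo]
  | cons y ys ih => simp [pvGo, ih, pvTagStr]

-- ===== VERDICT (by name: the statement is the Claim_ definition above) =====
theorem L21_length_compare_spec : Claim_equal_L21_length_compare := by
  intro L _
  unfold Spec_L21_length_compare L21_length_compare_alt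
  rw [pvA_eq_map]
  rcases L with _ | ⟨x, xs⟩
  · simp [PySem.List.enumerate]
  · show List.map (pvTagA (x :: xs)) (PySem.List.enumerate (x :: xs)) =
      ["SHORT"] ++ pvSeg (PySem.Str.len x) xs
    rw [pvSeg_eq_go xs.length xs rfl, pvGo_zip, List.singleton_append]
    apply List.ext_getElem?
    intro k
    rw [List.getElem?_map, PySem.List.getElem?_enumerate]
    match k with
    | 0 =>
      simp [pvTagA]
    | (j+1) =>
      by_cases hj : j + 1 < (x :: xs).length
      · have hx : (x :: xs)[j+1]? = some ((x :: xs)[j+1]) := List.getElem?_eq_getElem hj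
        rw [hx]
        have htag : pvTagA (x :: xs) (0 + (↑(j+1) : Int), (x :: xs)[j+1]) =
            (fun p : Int × Int => if p.2 > p.1 then "LONGER" else if p.2 < p.1 then "SHORTER" else "EQUAL")
              (PySem.Str.len ((x :: xs)[j]'(by omega)), PySem.Str.len ((x :: xs)[j+1])) := by
          have hg : PySem.List.pyGetD (x :: xs) ((0 : Int) + (↑(j+1) : Int) - 1) "" = (x :: xs)[j]'(by omega) := by
            rw [show ((0 : Int) + (↑(j+1) : Int) - 1) = ((j : Nat) : Int) by push_cast; ring]
            rw [PySem.List.pyGetD_natCast]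
            exact List.getD_eq_getElem _ _ (by omega)
          simp only [pvTagA, hg]
          rw [if_neg (by simp only [beq_iff_eq]; omega)]
        have hz : (((PySem.Str.len x :: xs.map PySem.Str.len).zip (xs.map PySem.Str.len)).map
            (fun p : Int × Int => if p.2 > p.1 then "LONGER" else if p.2 < p.1 then "SHORTER" else "EQUAL"))[j]?
            = some ((fun p : Int × Int => if p.2 > p.1 then "LONGER" else if p.2 < p.1 then "SHORTER" else "EQUAL")
              (PySem.Str.len ((x :: xs)[j]'(by omega)), PySem.Str.len ((x :: xs)[j+1]))) := by
          rw [List.getElem?_map]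
          have heq : (PySem.Str.len x :: xs.map PySem.Str.len) = ((x :: xs).map PySem.Str.len) := by simp
          have hzg : ((PySem.Str.len x :: xs.map PySem.Str.len).zip (xs.map PySem.Str.len))[j]? =
              some (PySem.Str.len ((x :: xs)[j]'(by omega)), PySem.Str.len ((x :: xs)[j+1])) := by
            rw [heq, show (xs.map PySem.Str.len) = ((x :: xs).map PySem.Str.len).tail by simp]
            rw [List.getElem?_eq_getElem (by
              simp only [List.length_map, List.length_zip, List.length_tail, List.length_cons]
              simp only [List.length_cons] at hj
              omega)]
            simp only [List.getElem_zip, List.getElem_tail, List.getElem_map]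
          rw [hzg]
          rfl
        simp only [List.getElem?_cons_succ, hz, Option.map_some, htag]
      · have hx : (x :: xs)[j+1]? = none := List.getElem?_eq_none (by omega)
        rw [hx, List.getElem?_cons_succ]
        simp only [Option.map_none]
        symm
        rw [List.getElem?_eq_none_iff]
        simp only [List.length_zip, List.length_map, List.length_cons]
        simp only [List.length_cons] at hj
        omega
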